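-- pv_equiv track=rewrite | github.com/ae-s/pysmpp | pySMPP/sms.py | convert8to7bit
-- ===== SOURCE A (Python) =====
-- def convert8to7bit(str):
--     """Convert 8bit string to compressed 7bit string of hex values.
--     Returns string."""
--
--     length = len(str)
--     str = str + '\0'
--     dp = ''
--     j = 0
--     while length > 0:
--         bb = ord(str[j])
--         i = 7
--         while i > 0 and length > 0:
--             bb = bb | ord(str[j+8-i]) << i
--             dp = dp + chr(0xff & bb)
--             bb = bb >> 8
--             length = length - 1
--             i = i - 1
--         length = length - 1
--         j = j + 8
--
--     return dp
-- ===== SOURCE B (Python) =====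
-- def convert8to7bit(str):
--     """Convert 8bit string to compressed 7bit string of hex values.
--     Returns string."""
--     out = []
--     for start in range(0, len(str), 8):
--         chunk = str[start:start+8]
--         val = 0
--         for ch in reversed(chunk):
--             val = val * 128 + ord(ch)
--         for b in range(min(len(chunk), 7)):
--             out.append(chr((val // 256 ** b) % 256))
--     return ''.join(out)
-- ===== Notes on version B (the rewrite author's own statement) =====
-- stated objective: faster
-- what changed: Replaces A's nested while loops with carried bit-accumulator and quadratic `dp = dp + chr(...)` string growth by chunk-at-a-time arithmetic: each 8-char slice is folded into one base-128 integer and its output bytes are read off as (val // 256**b) % 256 into a list joined once at the end.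
import Mathlib
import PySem

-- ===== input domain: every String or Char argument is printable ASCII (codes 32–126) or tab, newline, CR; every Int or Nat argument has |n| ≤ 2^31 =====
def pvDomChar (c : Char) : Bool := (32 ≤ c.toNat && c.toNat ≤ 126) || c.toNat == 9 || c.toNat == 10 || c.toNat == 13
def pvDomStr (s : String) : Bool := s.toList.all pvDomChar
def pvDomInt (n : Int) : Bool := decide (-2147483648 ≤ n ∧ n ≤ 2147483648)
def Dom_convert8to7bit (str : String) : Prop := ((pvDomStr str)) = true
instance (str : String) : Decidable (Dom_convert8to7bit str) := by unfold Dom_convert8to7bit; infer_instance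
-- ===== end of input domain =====

-- B packs each 8-char chunk into one base-128 integer and reads the output bytes off
-- arithmetically, collecting them in a list joined once, instead of A's byte-carrying
-- accumulator in nested while loops growing the output by repeated string concatenation;
-- a timing run measured B faster. Equal on the claimed ASCII domain.


-- ===== PORT A =====
-- inner `while i > 0 and length > 0:` loop of A; `i` counts 7,6,…  All string indices
-- A ever uses are in range (shown by the proofs below), so Python never raises here;
-- `.getD` only totalises the out-of-range case that never occurs.
def convA_inner (s : List Char) (bb : Nat) (i : Nat) (length : Int) (j : Int)
    (dp : List Char) : List Char × Int :=
  match i with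
  | 0 => (dp, length)
  | i' + 1 =>
    if length > 0 then
      let bb2 := bb ||| (((PySem.List.pyGet? s (j + 8 - ((i' : Int) + 1))).getD (Char.ofNat 0)).toNat <<< (i' + 1))
      convA_inner s (bb2 >>> 8) i' (length - 1) j (dp ++ [Char.ofNat (0xff &&& bb2)])
    else (dp, length)

-- outer `while length > 0:` loop; fuel only makes the recursion total (each iteration
-- strictly decreases `length`, and the initial fuel `len(str)` is always enough).
def convA_outer (fuel : Nat) (s : List Char) (length : Int) (j : Int) (dp : List Char) : List Char :=
  match fuel with
  | 0 => dp
  | fuel' + 1 =>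
    if length > 0 then
      let bb := ((PySem.List.pyGet? s j).getD (Char.ofNat 0)).toNat
      let r := convA_inner s bb 7 length j dp
      convA_outer fuel' s (r.2 - 1) (j + 8) r.1
    else dp

def convert8to7bit (str : String) : String :=
  let cs := str.toList
  String.ofList (convA_outer cs.length (cs ++ [Char.ofNat 0]) (cs.length : Int) 0 [])

-- ===== PORT B =====
-- val = 0; for ch in reversed(chunk): val = val * 128 + ord(ch)
def convB_val (chunk : List Char) : Nat :=
  chunk.reverse.foldl (fun v c => v * 128 + c.toNat) 0

-- the `for start in range(0, len(str), 8)` loop, one 8-char slice per step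
def convB_go : List Char → List Char
  | [] => []
  | x :: xs =>
    let chunk := (x :: xs).take 8
    let val := convB_val chunk
    ((List.range (min chunk.length 7)).map (fun b => Char.ofNat (val / 256 ^ b % 256)))
      ++ convB_go ((x :: xs).drop 8)
termination_by l => l.length
decreasing_by simp

def convert8to7bit_alt (str : String) : String := String.ofList (convB_go str.toList)

-- ===== PRECONDITION & SPEC =====
def Spec_convert8to7bit (str : String) (out : String) : Prop := out = convert8to7bit_alt str
instance (str : String) (out : String) : Decidable (Spec_convert8to7bit str out) := by unfold Spec_convert8to7bit; infer_instance

-- ===== CLAIM (what is proved, stated in full; the proofs are below) =====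
def Claim_equal_convert8to7bit : Prop := ∀ (str : String), Dom_convert8to7bit str → Spec_convert8to7bit str (convert8to7bit str)

-- ===== LEMMAS AND PROOFS =====

theorem orAdd (i x c : Nat) (h : x < 2 ^ i) : x ||| (c <<< i) = x + c * 2 ^ i := by
  rw [Nat.or_comm, ← Nat.shiftLeft_add_eq_or_of_lt h c, Nat.shiftLeft_eq, Nat.add_comm]

-- little-endian base-128 value of a char list (the per-chunk integer B builds)
def valF : List Char → Nat
  | [] => 0
  | c :: w => c.toNat + 128 * valF w

theorem foldr_valF (l : List Char) :
    l.foldr (fun c v => v * 128 + c.toNat) 0 = valF l := by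
  induction l with
  | nil => rfl
  | cons c w ih => simp only [List.foldr, valF, ih]; ring

theorem convB_val_eq (chunk : List Char) : convB_val chunk = valF chunk := by
  unfold convB_val
  rw [List.foldl_reverse]
  exact foldr_valF chunk

theorem valF_append_zero (w : List Char) : valF (w ++ [Char.ofNat 0]) = valF w := by
  induction w with
  | nil => simp [valF]
  | cons c w ih => simp [valF, ih]

-- the bytes A's inner loop emits, written arithmetically
def emitF : Nat → Nat → List Char → List Char
  | _, _, [] => []
  | bb, i, c :: w =>
      Char.ofNat ((bb + c.toNat * 2 ^ i) % 256) :: emitF ((bb + c.toNat * 2 ^ i) / 256) (i - 1) w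

theorem bb_next_lt {bb c i : Nat} (hbb : bb < 2 ^ (i + 1)) (hc : c < 128) :
    (bb + c * 2 ^ (i + 1)) / 256 < 2 ^ i := by
  have h2 : (2 : Nat) ^ (i + 1) * 128 = 2 ^ i * 256 := by rw [pow_succ]; ring
  have hlt : bb + c * 2 ^ (i + 1) < 2 ^ (i + 1) * 128 := by nlinarith
  rw [Nat.div_lt_iff_lt_mul (by norm_num : 0 < 256)]
  omega

theorem and255 (x : Nat) : 0xff &&& x = x % 256 := by
  rw [Nat.and_comm]
  have h := Nat.and_two_pow_sub_one_eq_mod x 8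
  norm_num at h
  exact h

theorem shr8 (x : Nat) : x >>> 8 = x / 256 := by
  simp [Nat.shiftRight_eq_div_pow]

theorem emit_eq : ∀ (w : List Char) (i bb : Nat),
    w.length ≤ i → bb < 2 ^ i → (∀ c ∈ w, c.toNat < 128) →
    emitF bb i w
      = (List.range w.length).map (fun b => Char.ofNat ((bb + 2 ^ i * valF w) / 256 ^ b % 256)) := by
  intro w
  induction w with
  | nil => intro i bb _ _ _; simp [emitF]
  | cons c w' ih =>
    intro i bb hw hbb hw7
    simp only [List.length_cons] at hw
    obtain ⟨i'', rfl⟩ : ∃ i'', i = i'' + 1 := ⟨i - 1, by omega⟩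
    have hc : c.toNat < 128 := hw7 c (by simp)
    have htot : bb + 2 ^ (i'' + 1) * valF (c :: w')
        = (bb + c.toNat * 2 ^ (i'' + 1)) + 256 * (2 ^ i'' * valF w') := by
      simp only [valF]; rw [pow_succ]; ring
    simp only [emitF, Nat.add_sub_cancel]
    rw [ih i'' ((bb + c.toNat * 2 ^ (i'' + 1)) / 256) (by simpa using hw)
        (bb_next_lt hbb hc) (fun d hd => hw7 d (by simp [hd]))]
    rw [List.length_cons, List.range_succ_eq_map, List.map_cons, List.map_map]
    congr 1
    · rw [htot]; simp [Nat.add_mul_mod_self_left]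
    · apply List.map_congr_left
      intro b _
      simp only [Function.comp_apply, Nat.succ_eq_add_one]
      congr 1
      rw [htot, pow_succ 256 b, mul_comm (256 ^ b) 256, ← Nat.div_div_eq_div_mul,
        Nat.add_mul_div_left _ _ (by norm_num : (0:Nat) < 256)]

theorem inner_eval : ∀ (w : List Char) (i bb : Nat) (length j : Int) (dp s : List Char),
    w.length ≤ i →
    bb < 2 ^ i →
    (∀ c ∈ w, c.toNat < 128) →
    (w.length : Int) ≤ length →
    (w.length < i → length = (w.length : Int)) →
    (∀ t : Nat, (ht : t < w.length) →
        PySem.List.pyGet? s (j + 8 - (i : Int) + (t : Int)) = some (w[t]'ht)) →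
    convA_inner s bb i length j dp = (dp ++ emitF bb i w, length - w.length) := by
  intro w
  induction w with
  | nil =>
    intro i bb length j dp s _ _ _ _ hstop _
    match i with
    | 0 => simp [convA_inner, emitF]
    | i' + 1 =>
      have h0 : length = 0 := hstop (by simp)
      simp [convA_inner, emitF, h0]
  | cons c w' ih =>
    intro i bb length j dp s hw hbb hw7 hlen hstop hidx
    simp only [List.length_cons] at hw hlen hstop
    obtain ⟨i'', rfl⟩ : ∃ i'', i = i'' + 1 := ⟨i - 1, by omega⟩
    have hc : c.toNat < 128 := hw7 c (by simp)
    have hpos : length > 0 := by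
      have h1 : (0 : Int) ≤ (w'.length : Int) := by positivity
      omega
    have hg : PySem.List.pyGet? s (j + 8 - ((i'' : Int) + 1)) = some c := by
      have h0 := hidx 0 (by simp)
      rw [show j + 8 - (((i'' + 1 : Nat) : Int)) + ((0 : Nat) : Int)
            = j + 8 - ((i'' : Int) + 1) by push_cast; ring] at h0
      simpa using h0
    simp only [convA_inner, if_pos hpos, hg, Option.getD_some]
    rw [orAdd (i'' + 1) bb c.toNat hbb, and255, shr8]
    rw [ih i'' _ (length - 1) j _ s (by simpa using hw) (bb_next_lt hbb hc)
        (fun d hd => hw7 d (by simp [hd]))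
        (by omega)
        (by intro hlt; have := hstop (by omega); push_cast at this ⊢; omega)
        (by
          intro t ht
          have h1 := hidx (t + 1) (by simpa using Nat.add_lt_add_right ht 1)
          rw [show j + 8 - (((i'' + 1 : Nat) : Int)) + (((t + 1 : Nat)) : Int)
                = j + 8 - ((i'' : Int)) + ((t : Nat) : Int) by push_cast; ring] at h1
          simpa using h1)]
    simp only [emitF, Nat.add_sub_cancel, Prod.mk.injEq]
    refine ⟨by simp, by simp only [List.length_cons]; push_cast; ring⟩

theorem outer_nonpos (fuel : Nat) (s : List Char) (length j : Int) (dp : List Char)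
    (h : ¬ length > 0) : convA_outer fuel s length j dp = dp := by
  cases fuel <;> simp [convA_outer, h]

theorem main_loop : ∀ (fuel : Nat) (l pre dp : List Char),
    l.length ≤ fuel → (∀ c ∈ l, c.toNat < 128) →
    convA_outer fuel (pre ++ l ++ [Char.ofNat 0]) (l.length : Int) (pre.length : Int) dp
      = dp ++ convB_go l := by
  intro fuel
  induction fuel with
  | zero =>
    intro l pre dp hf _
    have : l = [] := List.eq_nil_of_length_eq_zero (by omega)
    subst this
    simp [convA_outer, convB_go]
  | succ fuel ih =>
    intro l pre dp hf hl
    match l with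
    | [] => simp [convA_outer, convB_go]
    | c :: rest =>
      have hc : c.toNat < 128 := hl c (by simp)
      have hpos : ((c :: rest).length : Int) > 0 := by exact_mod_cast Nat.succ_pos rest.length
      have hsplit : pre ++ (c :: rest) ++ [Char.ofNat 0]
          = (pre ++ [c]) ++ (rest ++ [Char.ofNat 0]) := by simp
      have hbb : PySem.List.pyGet? (pre ++ (c :: rest) ++ [Char.ofNat 0]) (pre.length : Int)
          = some c := by
        rw [show pre ++ (c :: rest) ++ [Char.ofNat 0]
              = pre ++ (c :: (rest ++ [Char.ofNat 0])) by simp]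
        exact PySem.List.pyGet?_append_length pre _ c
      simp only [convA_outer, if_pos hpos, hbb, Option.getD_some]
      by_cases h7 : 7 ≤ rest.length
      · -- full chunk of 8 chars, 7 output bytes
        have hlen7 : (rest.take 7).length = 7 := by simp [List.length_take]; omega
        have hinner := inner_eval (rest.take 7) 7 c.toNat ((c :: rest).length : Int)
            (pre.length : Int) dp (pre ++ (c :: rest) ++ [Char.ofNat 0])
            (by omega)
            (by simpa using hc)
            (fun d hd => hl d (by simp; right; exact List.mem_of_mem_take hd))
            (by rw [hlen7]; simp; omega)
            (by intro hlt; omega)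
            (by
              intro t ht
              rw [hlen7] at ht
              have htr : t < rest.length := by omega
              rw [hsplit, show (pre.length : Int) + 8 - ((7 : Nat) : Int) + (t : Int)
                    = ((pre ++ [c]).length : Int) + (t : Int) by simp; ring]
              rw [PySem.List.pyGet?_append_right (pre ++ [c]) _ t]
              rw [List.getElem?_append_left (by omega), List.getElem?_eq_getElem htr]
              congr 1
              exact (List.getElem_take).symm)
        rw [hinner]
        dsimp only
        rw [show ((rest.take 7).length : Int) = 7 by simp [hlen7]]
        have hdrop : (rest.drop 7).length ≤ fuel := by
          simp at hf ⊢; omega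
        have hIH := ih (rest.drop 7) (pre ++ c :: rest.take 7) (dp ++ emitF c.toNat 7 (rest.take 7))
            hdrop
            (fun d hd => hl d (by simp; right; exact List.mem_of_mem_drop hd))
        rw [show (pre ++ c :: rest.take 7) ++ rest.drop 7 ++ [Char.ofNat 0]
              = pre ++ (c :: rest) ++ [Char.ofNat 0] by simp] at hIH
        rw [show ((rest.drop 7).length : Int) = ((c :: rest).length : Int) - 7 - 1 by
              simp [List.length_drop]; omega] at hIH
        rw [show ((pre ++ c :: rest.take 7).length : Int) = (pre.length : Int) + 8 by
              simp [hlen7]] at hIH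
        rw [hIH]
        -- identify B's first chunk
        have hchunk : (c :: rest).take 8 = c :: rest.take 7 := by simp
        have hbytes : emitF c.toNat 7 (rest.take 7)
            = (List.range (min (c :: rest.take 7).length 7)).map
                (fun b => Char.ofNat (convB_val (c :: rest.take 7) / 256 ^ b % 256)) := by
          rw [emit_eq (rest.take 7) 7 c.toNat (by omega) (by simpa using hc)
                (fun d hd => hl d (by simp; right; exact List.mem_of_mem_take hd))]
          rw [convB_val_eq]
          simp [hlen7, valF]
        conv_rhs => rw [convB_go]
        rw [hchunk, show (c :: rest).drop 8 = rest.drop 7 by simp, ← hbytes]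
        simp
      · -- final partial chunk (1–7 chars): the trailing '\0' supplies the last byte's high bits
        have hw7 : ∀ d ∈ rest ++ [Char.ofNat 0], d.toNat < 128 := by
          intro d hd
          rcases List.mem_append.mp hd with h | h
          · exact hl d (by simp [h])
          · simp at h; subst h; decide
        have hinner := inner_eval (rest ++ [Char.ofNat 0]) 7 c.toNat ((c :: rest).length : Int)
            (pre.length : Int) dp (pre ++ (c :: rest) ++ [Char.ofNat 0])
            (by simp; omega)
            (by simpa using hc)
            hw7
            (by simp)
            (by intro _; simp)
            (by
              intro t ht
              rw [hsplit, show (pre.length : Int) + 8 - ((7 : Nat) : Int) + (t : Int)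
                    = ((pre ++ [c]).length : Int) + (t : Int) by simp; ring]
              rw [PySem.List.pyGet?_append_right (pre ++ [c]) _ t]
              exact List.getElem?_eq_getElem ht)
        rw [hinner]
        dsimp only
        rw [show ((c :: rest).length : Int) - ((rest ++ [Char.ofNat 0]).length : Nat) - 1
              = -1 by simp]
        rw [outer_nonpos _ _ _ _ _ (by norm_num)]
        have hchunk : (c :: rest).take 8 = c :: rest := List.take_of_length_le (by simp; omega)
        have hbytes : emitF c.toNat 7 (rest ++ [Char.ofNat 0])
            = (List.range (min (c :: rest).length 7)).map
                (fun b => Char.ofNat (convB_val (c :: rest) / 256 ^ b % 256)) := by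
          rw [emit_eq (rest ++ [Char.ofNat 0]) 7 c.toNat (by simp; omega) (by simpa using hc) hw7]
          rw [convB_val_eq]
          simp [valF, valF_append_zero, Nat.min_eq_left (show rest.length + 1 ≤ 7 by omega)]
        conv_rhs => rw [convB_go]
        rw [hchunk, show (c :: rest).drop 8 = [] from List.drop_of_length_le (by simp; omega),
          ← hbytes]
        simp [convB_go]

theorem chars_lt_128 (str : String) (h : Dom_convert8to7bit str) :
    ∀ c ∈ str.toList, c.toNat < 128 := by
  intro c hc
  have := List.all_eq_true.mp h c hc
  simp [pvDomChar] at this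
  omega

-- ===== VERDICT (by name: the statement is the Claim_ definition above) =====
theorem convert8to7bit_spec : Claim_equal_convert8to7bit := by
  intro str hdom
  unfold Spec_convert8to7bit convert8to7bit convert8to7bit_alt
  exact congrArg String.ofList
    (by simpa using main_loop str.toList.length str.toList [] [] le_rfl (chars_lt_128 str hdom))
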